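-- pv_equiv track=rewrite | github.com/joel-tuberosa/psgfinder | psgfindertools/dna.py | map_al_coordinates
-- ===== SOURCE A (Python) =====
-- def map_al_coordinates(gap_map):
--     '''returns a list of continuous alignments coordinates'''
--
--     c = []
--     switch = 0
--     for i in range(len(gap_map)):
--         if gap_map[i] == '-':
--             if switch == 0:
--                 continue
--             else:
--                 if i != 0: c[-1] += [i]
--                 switch = 0
--         else:
--             if switch == 0:
--                 c.append([i])
--                 switch = 1
--             else:
--                 continue
--     if len(c[-1]) == 1: c[-1].append(len(gap_map))
--     return c
-- ===== SOURCE B (Python) =====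
-- def map_al_coordinates(gap_map):
--     '''returns a list of continuous alignments coordinates'''
--     c = []
--     i = 0
--     n = len(gap_map)
--     while i < n:
--         if gap_map[i] == '-':
--             i += 1
--         else:
--             start = i
--             while i < n and gap_map[i] != '-':
--                 i += 1
--             c.append([start, i])
--     return c
-- ===== Notes on version B (the rewrite author's own statement) =====
-- stated objective: simpler
-- what changed: Replaces the switch-flag state machine plus end-of-loop patch-up with a run-scanning loop that, for each maximal non-gap run, appends the closed interval [start, end) directly; no flag, no mutation of the last interval, no final fix-up line.
import Mathlib
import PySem

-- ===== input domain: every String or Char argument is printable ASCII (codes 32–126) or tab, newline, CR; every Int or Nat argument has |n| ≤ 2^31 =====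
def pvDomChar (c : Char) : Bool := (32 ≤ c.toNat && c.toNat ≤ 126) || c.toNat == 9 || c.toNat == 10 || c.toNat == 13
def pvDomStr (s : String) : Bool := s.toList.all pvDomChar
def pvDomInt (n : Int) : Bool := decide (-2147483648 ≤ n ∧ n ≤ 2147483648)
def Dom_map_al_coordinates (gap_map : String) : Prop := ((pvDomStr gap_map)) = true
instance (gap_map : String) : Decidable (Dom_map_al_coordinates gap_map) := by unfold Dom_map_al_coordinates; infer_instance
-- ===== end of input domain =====

-- B replaces A's switch-flag state machine (with its final fix-up of the last interval) by a
-- run-scanning loop appending each closed interval [start, end) directly (objective: simpler).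
-- On all-gap / empty input Python A raises IndexError (excluded by Pre_); B returns [] there.

-- ===== PORT A =====
def map_al_coordinates (gap_map : String) : List (List Int) :=
  let xs := gap_map.toList
  let n : Int := PySem.Str.len gap_map
  let r := (PySem.List.pyRange 0 n 1).foldl
    (fun (st : List (List Int) × Int) (i : Int) =>
      if PySem.List.pyGetD xs i ' ' = '-' then
        if st.2 = 0 then (st.1, st.2)
        else ((if i ≠ 0 then st.1.dropLast ++ [(st.1.getLast?.getD []) ++ [i]] else st.1), 0)
      else
        if st.2 = 0 then (st.1 ++ [[i]], 1) else (st.1, st.2))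
    ([], 0)
  -- final: if len(c[-1]) == 1: c[-1].append(len(gap_map));  c[-1] on empty c raises in Python (excluded by Pre_)
  match r.1.getLast? with
  | none => []
  | some last => if last.length = 1 then r.1.dropLast ++ [last ++ [n]] else r.1

-- ===== PORT B =====
-- inner while: length of the leading run of non-gap characters
def runLen : List Char → Nat
  | [] => 0
  | ch :: rest => if ch = '-' then 0 else runLen rest + 1

-- outer while over the remaining suffix; i = absolute index of its first character.
-- fuel only makes the loop total (each iteration consumes ≥ 1 character, so l.length fuel suffices).
def altGo : Nat → List Char → Int → List (List Int)
  | 0, _, _ => []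
  | _ + 1, [], _ => []
  | fuel + 1, ch :: rest, i =>
    if ch = '-' then altGo fuel rest (i + 1)
    else
      let k : Nat := runLen rest + 1
      [i, i + (k : Int)] :: altGo fuel (rest.drop (runLen rest)) (i + (k : Int))

def map_al_coordinates_alt (gap_map : String) : List (List Int) :=
  altGo gap_map.toList.length gap_map.toList 0

-- ===== PRECONDITION & SPEC =====
-- Pre_ excludes exactly the inputs where Python A raises IndexError (c[-1] on an empty c):
-- strings with no non-gap character (all '-' or empty).
def Pre_map_al_coordinates (gap_map : String) : Prop :=
  gap_map.toList.any (fun c => c ≠ '-') = true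
instance (gap_map : String) : Decidable (Pre_map_al_coordinates gap_map) := by
  unfold Pre_map_al_coordinates; infer_instance
def pvWitness_map_al_coordinates : String := "A-GT"

def Spec_map_al_coordinates (gap_map : String) (out : List (List Int)) : Prop := out = map_al_coordinates_alt gap_map
instance (gap_map : String) (out : List (List Int)) : Decidable (Spec_map_al_coordinates gap_map out) := by unfold Spec_map_al_coordinates; infer_instance

-- ===== CLAIM (what is proved, stated in full; the proofs are below) =====
def Claim_equal_map_al_coordinates : Prop := ∀ (gap_map : String), Dom_map_al_coordinates gap_map → Pre_map_al_coordinates gap_map → Spec_map_al_coordinates gap_map (map_al_coordinates gap_map)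

-- ===== LEMMAS AND PROOFS =====

-- A's loop body as a function of (index, character)
def stepA (st : List (List Int) × Int) (p : Int × Char) : List (List Int) × Int :=
  if p.2 = '-' then
    if st.2 = 0 then (st.1, st.2)
    else ((if p.1 ≠ 0 then st.1.dropLast ++ [(st.1.getLast?.getD []) ++ [p.1]] else st.1), 0)
  else
    if st.2 = 0 then (st.1 ++ [[p.1]], 1) else (st.1, st.2)

-- A's trailing fix-up
def fixup (e : Int) (c : List (List Int)) : List (List Int) :=
  match c.getLast? with
  | none => []
  | some last => if last.length = 1 then c.dropLast ++ [last ++ [e]] else c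

lemma runLen_le_length (l : List Char) : runLen l ≤ l.length := by
  induction l with
  | nil => simp [runLen]
  | cons ch rest ih => simp [runLen]; split <;> omega

lemma drop_runLen (l : List Char) (h : runLen l < l.length) :
    l.drop (runLen l) = '-' :: l.drop (runLen l + 1) := by
  induction l with
  | nil => simp at h
  | cons ch rest ih =>
    by_cases hc : ch = '-'
    · simp [runLen, hc]
    · simp only [runLen, if_neg hc, List.length_cons] at h ⊢
      simpa using ih (by omega)

lemma altGo_fuel (f1 : Nat) : ∀ (f2 : Nat) (l : List Char) (i : Int),
    l.length ≤ f1 → l.length ≤ f2 → altGo f1 l i = altGo f2 l i := by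
  induction f1 with
  | zero =>
    intro f2 l i h1 _
    have : l = [] := List.eq_nil_of_length_eq_zero (by omega)
    subst this
    cases f2 <;> simp [altGo]
  | succ f1 ih =>
    intro f2 l i h1 h2
    cases l with
    | nil => cases f2 <;> simp [altGo]
    | cons ch rest =>
      cases f2 with
      | zero => simp at h2
      | succ f2 =>
        simp only [altGo]
        by_cases hc : ch = '-'
        · rw [if_pos hc, if_pos hc]
          exact ih f2 rest (i + 1) (by simpa using Nat.lt_succ_iff.mp (by simpa using h1))
            (by simpa using Nat.lt_succ_iff.mp (by simpa using h2))
        · rw [if_neg hc, if_neg hc]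
          congr 1
          simp only [List.length_cons] at h1 h2
          exact ih f2 _ _ (by simp only [List.length_drop]; omega)
            (by simp only [List.length_drop]; omega)

lemma altGo_nil (f : Nat) (i : Int) : altGo f [] i = [] := by
  cases f <;> rfl

lemma altGo_gap (f : Nat) (rest : List Char) (i : Int) :
    altGo (f + 1) ('-' :: rest) i = altGo f rest (i + 1) := by
  simp [altGo]

lemma altGo_nongap (f : Nat) (ch : Char) (rest : List Char) (i : Int) (hc : ch ≠ '-') :
    altGo (f + 1) (ch :: rest) i
      = [i, i + ((runLen rest + 1 : Nat) : Int)]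
        :: altGo f (rest.drop (runLen rest)) (i + ((runLen rest + 1 : Nat) : Int)) := by
  simp [altGo, hc]

lemma fixup_closed (e : Int) (acc : List (List Int)) (h : ∀ iv ∈ acc, iv.length = 2) :
    fixup e acc = acc := by
  cases hacc : acc.getLast? with
  | none => rw [List.getLast?_eq_none_iff.mp hacc]; simp [fixup]
  | some last =>
    have h2 : last.length = 2 := h last (List.mem_of_getLast? hacc)
    simp [fixup, hacc, h2]

lemma fixup_open (e t : Int) (acc : List (List Int)) :
    fixup e (acc ++ [[t]]) = acc ++ [[t, e]] := by
  simp [fixup]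

lemma fold1 (l : List Char) : ∀ (s : Nat), 1 ≤ s → ∀ (t : Int) (acc : List (List Int)),
    (PySem.List.enumerate l (s : Int)).foldl stepA (acc ++ [[t]], 1) =
      if runLen l = l.length
      then (acc ++ [[t]], 1)
      else (PySem.List.enumerate (l.drop (runLen l + 1)) ((s : Int) + runLen l + 1)).foldl stepA
             (acc ++ [[t, (s : Int) + runLen l]], 0) := by
  induction l with
  | nil => intro s hs t acc; simp [PySem.List.enumerate_nil, runLen]
  | cons ch rest ih =>
    intro s hs t acc
    rw [PySem.List.enumerate_cons, List.foldl_cons]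
    by_cases hc : ch = '-'
    · subst hc
      have hstep : stepA (acc ++ [[t]], 1) ((s : Int), '-') = (acc ++ [[t, (s : Int)]], 0) := by
        simp [stepA]; omega
      rw [hstep, if_neg (by simp [runLen])]
      simp [runLen]
    · have hstep : stepA (acc ++ [[t]], 1) ((s : Int), ch) = (acc ++ [[t]], 1) := by
        simp [stepA, hc]
      have h1 : ((s : Int) + 1) = ((s + 1 : Nat) : Int) := by push_cast; ring
      rw [hstep, h1, ih (s + 1) (by omega) t acc]
      simp only [runLen, if_neg hc]
      by_cases hr : runLen rest = rest.length
      · rw [if_pos hr, if_pos (by simp [hr])]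
      · rw [if_neg hr, if_neg (by simp; omega)]
        rw [List.drop_succ_cons]
        push_cast
        ring_nf

lemma main_lemma : ∀ (fuel : Nat) (l : List Char), l.length ≤ fuel →
    ∀ (s : Nat) (acc : List (List Int)), (∀ iv ∈ acc, iv.length = 2) →
    fixup ((s : Int) + l.length) ((PySem.List.enumerate l (s : Int)).foldl stepA (acc, 0)).1
      = acc ++ altGo fuel l (s : Int) := by
  intro fuel
  induction fuel with
  | zero =>
    intro l hl s acc hacc
    have : l = [] := List.eq_nil_of_length_eq_zero (by omega)
    subst this
    simp only [PySem.List.enumerate_nil, List.foldl_nil, altGo, List.append_nil,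
      List.length_nil, Int.natCast_zero, add_zero]
    exact fixup_closed _ _ hacc
  | succ fuel ih =>
    intro l hl s acc hacc
    cases l with
    | nil =>
      simp only [PySem.List.enumerate_nil, List.foldl_nil, altGo, List.append_nil,
        List.length_nil, Int.natCast_zero, add_zero]
      exact fixup_closed _ _ hacc
    | cons ch rest =>
      rw [PySem.List.enumerate_cons, List.foldl_cons]
      have hrl : rest.length ≤ fuel := by simpa using Nat.lt_succ_iff.mp (by simpa using hl)
      by_cases hc : ch = '-'
      · subst hc
        have hstep : stepA (acc, 0) ((s : Int), '-') = (acc, 0) := by simp [stepA]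
        rw [hstep]
        have h1 : ((s : Int) + 1) = ((s + 1 : Nat) : Int) := by push_cast; ring
        have h2 : ((s : Int) + (('-' :: rest).length : Int)) = ((s + 1 : Nat) : Int) + rest.length := by
          push_cast; simp; ring
        rw [h1, h2, ih rest hrl (s + 1) acc hacc, altGo_gap, h1]
      · have hstep : stepA (acc, 0) ((s : Int), ch) = (acc ++ [[(s : Int)]], 1) := by
          simp [stepA, hc]
        rw [hstep]
        have h1 : ((s : Int) + 1) = ((s + 1 : Nat) : Int) := by push_cast; ring
        rw [h1, fold1 rest (s + 1) (by omega) (s : Int) acc]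
        by_cases hr : runLen rest = rest.length
        · rw [if_pos hr]
          have hdrop : rest.drop (runLen rest) = [] := by rw [hr]; simp
          rw [fixup_open, altGo_nongap fuel ch rest _ hc, hdrop, altGo_nil]
          push_cast
          simp [hr]
        · rw [if_neg hr]
          have hlt : runLen rest < rest.length := lt_of_le_of_ne (runLen_le_length rest) hr
          have hcast : ((s + 1 : Nat) : Int) + (runLen rest : Int) + 1
              = ((s + runLen rest + 2 : Nat) : Int) := by push_cast; ring
          have hcast2 : ((s + 1 : Nat) : Int) + (runLen rest : Int)
              = (s : Int) + (runLen rest : Int) + 1 := by push_cast; ring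
          rw [hcast, hcast2]
          have hacc' : ∀ iv ∈ acc ++ [[(s : Int), (s : Int) + (runLen rest : Int) + 1]],
              iv.length = 2 := by
            intro iv hiv
            rcases List.mem_append.mp hiv with h | h
            · exact hacc _ h
            · simp at h; subst h; rfl
          have hdl : (rest.drop (runLen rest + 1)).length ≤ fuel := by
            simp [List.length_drop]; omega
          have harg : ((s : Int) + ((ch :: rest).length : Int))
              = ((s + runLen rest + 2 : Nat) : Int) + ((rest.drop (runLen rest + 1)).length : Int) := by
            simp [List.length_drop]; omega
          rw [harg, ih (rest.drop (runLen rest + 1)) hdl (s + runLen rest + 2) _ hacc']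
          have hend : altGo (fuel + 1) (ch :: rest) (s : Int)
              = [(s : Int), (s : Int) + (runLen rest : Int) + 1]
                :: altGo fuel (rest.drop (runLen rest + 1)) ((s + runLen rest + 2 : Nat) : Int) := by
            rw [altGo_nongap fuel ch rest _ hc, drop_runLen rest hlt]
            cases fuel with
            | zero => omega
            | succ f =>
              rw [altGo_gap,
                show (s : Int) + ((runLen rest + 1 : Nat) : Int) + 1
                  = ((s + runLen rest + 2 : Nat) : Int) from by push_cast; ring,
                altGo_fuel f (f + 1) _ _ (by simp only [List.length_drop]; omega)
                  (by simp only [List.length_drop]; omega)]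
              push_cast
              simp only [add_assoc]
          rw [hend]
          simp

-- ===== VERDICT (by name: the statement is the Claim_ definition above) =====
theorem map_al_coordinates_spec : Claim_equal_map_al_coordinates := by
  unfold Claim_equal_map_al_coordinates
  intro gap_map _ _
  unfold Spec_map_al_coordinates map_al_coordinates map_al_coordinates_alt
  show fixup (PySem.Str.len gap_map)
      ((PySem.List.pyRange 0 (PySem.Str.len gap_map) 1).foldl
        (fun st i => stepA st (i, PySem.List.pyGetD gap_map.toList i ' ')) ([], 0)).1
    = altGo gap_map.toList.length gap_map.toList 0
  have hf : (PySem.List.pyRange 0 ((gap_map.toList.length : Int)) 1).foldl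
        (fun st i => stepA st (i, PySem.List.pyGetD gap_map.toList i ' ')) ([], 0)
      = (PySem.List.enumerate gap_map.toList 0).foldl stepA ([], 0) := by
    have he := PySem.List.enumerate_eq_map_pyRange gap_map.toList ' '
    simp only [PySem.List.len] at he
    rw [he, List.foldl_map]
  rw [PySem.Str.len_eq, hf]
  have := main_lemma gap_map.toList.length gap_map.toList le_rfl 0 [] (by simp)
  simpa [PySem.List.len] using this
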